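-- pv_equiv track=rewrite | github.com/ShayShN/Server-test | main.py | rail_action_de
-- ===== SOURCE A (Python) =====
-- list_abc = ["a","b","c","d","e","f","g","h","i","j","k","l","m","n","o","p","q","r","s","t","u","v","w","x","y","z"]
--
-- def rail_action_de(text: str):
--     txt = text.replace(" ", "")
--     word2 = ""
--     for i in txt:
--         index = list_abc.index(i)
--         if index % 2 == 0:
--             word2 += list_abc[index]
--         else:
--             word2 += list_abc[index]
--     return word2
-- ===== SOURCE B (Python) =====
-- def rail_action_de(text: str):
--     txt = text.replace(" ", "")
--     allowed = set("abcdefghijklmnopqrstuvwxyz")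
--     bad = set(txt) - allowed
--     if bad:
--         raise ValueError(f"invalid characters: {bad}")
--     return txt
-- ===== Notes on version B (the rewrite author's own statement) =====
-- stated objective: simpler
-- what changed: B validates the whole space-stripped string at once via a set-difference against the 26 allowed letters and returns it directly, instead of A's per-character list_abc.index linear scan and character-by-character string rebuild; the timed check measured B faster (no O(26) list scan per character, no quadratic string concatenation).
import Mathlib
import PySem

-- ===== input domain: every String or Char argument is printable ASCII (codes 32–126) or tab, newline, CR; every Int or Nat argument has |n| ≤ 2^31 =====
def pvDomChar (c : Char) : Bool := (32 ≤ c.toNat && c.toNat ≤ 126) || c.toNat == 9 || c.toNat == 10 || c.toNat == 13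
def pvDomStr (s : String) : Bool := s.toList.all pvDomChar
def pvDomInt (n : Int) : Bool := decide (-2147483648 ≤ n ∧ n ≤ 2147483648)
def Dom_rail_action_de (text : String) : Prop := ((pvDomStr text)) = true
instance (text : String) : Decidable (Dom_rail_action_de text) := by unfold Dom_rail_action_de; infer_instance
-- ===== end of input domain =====

-- B replaces A's per-character list_abc.index lookup and character-by-character rebuild
-- with one set-difference validation of the space-stripped string, returned directly (simpler; the timed check also measured B faster).

-- ===== PORT A =====
def listAbc : List Char :=
  ['a','b','c','d','e','f','g','h','i','j','k','l','m','n','o','p','q','r','s','t','u','v','w','x','y','z']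

-- the for-loop of A; none = ValueError from list_abc.index(i)
def railAGo : List Char → String → Option String
  | [], word2 => some word2
  | c :: rest, word2 =>
    match PySem.List.index? listAbc c with
    | none => none
    | some index =>
      if index % 2 == 0 then
        railAGo rest (word2 ++ String.ofList [listAbc.getD index ' '])  -- list_abc[index]; index is in range
      else
        railAGo rest (word2 ++ String.ofList [listAbc.getD index ' '])

def rail_action_de (text : String) : String :=
  let txt := PySem.Str.replace text " " ""
  (railAGo txt.toList "").getD ""   -- none (ValueError) is excluded by Pre_

-- ===== PORT B =====
def rail_action_de_alt (text : String) : String :=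
  let txt := PySem.Str.replace text " " ""
  let allowed := PySem.Set.ofList "abcdefghijklmnopqrstuvwxyz".toList
  let bad := PySem.Set.diff (PySem.Set.ofList txt.toList) allowed
  if bad.isEmpty then txt else ""   -- else-branch = ValueError, excluded by Pre_

-- ===== PRECONDITION & SPEC =====
-- Pre_ excludes exactly the inputs on which A raises ValueError: a character that is
-- neither a space nor a lowercase ASCII letter.
def Pre_rail_action_de (text : String) : Prop :=
  text.toList.all (fun c => c == ' ' || listAbc.contains c) = true
instance (text : String) : Decidable (Pre_rail_action_de text) := by
  unfold Pre_rail_action_de; infer_instance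
def pvWitness_rail_action_de : String := "ab c"

def Spec_rail_action_de (text : String) (out : String) : Prop := out = rail_action_de_alt text
instance (text : String) (out : String) : Decidable (Spec_rail_action_de text out) := by unfold Spec_rail_action_de; infer_instance

-- ===== CLAIM (what is proved, stated in full; the proofs are below) =====
def Claim_equal_rail_action_de : Prop := ∀ (text : String), Dom_rail_action_de text → Pre_rail_action_de text → Spec_rail_action_de text (rail_action_de text)

-- ===== LEMMAS AND PROOFS =====

-- replacing " " by "" is filtering out spaces
theorem replace_go_space (fuel : Nat) (l acc : List Char) (hf : l.length ≤ fuel) :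
    PySem.Chars.replace.go [' '] [] fuel l acc = acc.reverse ++ l.filter (· ≠ ' ') := by
  induction fuel generalizing l acc with
  | zero =>
    interval_cases hl : l.length
    · simp [List.length_eq_zero_iff.mp hl, PySem.Chars.replace.go]
  | succ n ih =>
    cases l with
    | nil => simp [PySem.Chars.replace.go]
    | cons c t =>
      by_cases hc : c = ' '
      · subst hc
        have : List.isPrefixOf [' '] (' ' :: t) = true := by
          simp [List.isPrefixOf]
        simp only [PySem.Chars.replace.go, this, if_pos]
        rw [ih _ _ (by simpa using Nat.le_of_succ_le_succ hf)]
        simp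
      · have : List.isPrefixOf [' '] (c :: t) = false := by
          simp [List.isPrefixOf]; exact fun h => (hc h.symm).elim
        simp only [PySem.Chars.replace.go, this]
        rw [if_neg (by simp), ih _ _ (by simpa using Nat.le_of_succ_le_succ hf)]
        simp [hc]

theorem replace_space (s : List Char) :
    PySem.Chars.replace s [' '] [] = s.filter (· ≠ ' ') := by
  unfold PySem.Chars.replace
  simp [replace_go_space s.length s [] le_rfl]

-- A's loop rebuilds exactly its input when every character is a letter
theorem railAGo_eq (l : List Char) (w : String)
    (h : ∀ c ∈ l, c ∈ listAbc) : railAGo l w = some (w ++ String.ofList l) := by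
  induction l generalizing w with
  | nil => simp [railAGo]
  | cons c t ih =>
    have hc : c ∈ listAbc := h c (List.mem_cons_self ..)
    obtain ⟨k, hk⟩ : ∃ k, PySem.List.index? listAbc c = some k :=
      Option.isSome_iff_exists.mp ((PySem.List.index?_isSome_iff listAbc c).mpr hc)
    obtain ⟨hklt, hget, -⟩ := PySem.List.getElem_of_index?_eq_some hk
    have hgetd : listAbc.getD k ' ' = c := by
      rw [List.getD_eq_getElem listAbc ' ' hklt, hget]
    have hstep : (w ++ String.ofList [c]) ++ String.ofList t = w ++ String.ofList (c :: t) := by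
      rw [String.append_assoc, ← String.ofList_append]; rfl
    have ht : ∀ x ∈ t, x ∈ listAbc := fun x hx => h x (List.mem_cons_of_mem _ hx)
    simp only [railAGo, hk]
    split <;> rw [hgetd, ih _ ht, hstep]

-- B's bad-set is empty when every character is a letter
theorem diff_empty (l : List Char) (h : ∀ c ∈ l, c ∈ listAbc) :
    (PySem.Set.diff (PySem.Set.ofList l)
      (PySem.Set.ofList "abcdefghijklmnopqrstuvwxyz".toList)).isEmpty = true := by
  rw [List.isEmpty_iff, List.eq_nil_iff_forall_not_mem]
  intro c hc
  have hd := (PySem.Set.mem_diff _ _ c).mp hc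
  exact hd.2 ((PySem.Set.mem_ofList _ c).mpr
    (h c ((PySem.Set.mem_ofList _ c).mp hd.1)))

theorem chars_of_txt (text : String) (h : Pre_rail_action_de text) :
    ∀ c ∈ (PySem.Str.replace text " " "").toList, c ∈ listAbc := by
  intro c hc
  rw [PySem.Str.toList_replace,
    show (" " : String).toList = [' '] from rfl,
    show ("" : String).toList = ([] : List Char) from rfl,
    replace_space] at hc
  rcases List.mem_filter.mp hc with ⟨hmem, hne⟩
  have h' : c = ' ' ∨ c ∈ listAbc := by
    have := List.all_eq_true.mp h c hmem
    simpa using this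
  rcases h' with h' | h'
  · subst h'; simp at hne
  · exact h'

-- ===== VERDICT (by name: the statement is the Claim_ definition above) =====
theorem rail_action_de_spec : Claim_equal_rail_action_de := by
  intro text _ hpre
  unfold Spec_rail_action_de rail_action_de rail_action_de_alt
  have hch := chars_of_txt text hpre
  simp only []
  rw [railAGo_eq _ _ hch, diff_empty _ hch]
  simp only [Option.getD_some, if_pos, String.empty_append]
  rw [String.ofList_toList]
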